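-- pv_equiv track=rewrite | github.com/LuisAxel/GitItDone | aoc/2024/day_4/2.py | find_xmas_in_crossword
-- ===== SOURCE A (Python) =====
-- def find_xmas_in_crossword(row, col, crossword):
--     if crossword[row][col] != 'A':
--         return 0
--     m_count, s_count = 0, 0
--
--     for d_row, d_col in ((-1, -1), (-1, 1), (1, -1), (1, 1)):
--         m_count += int(crossword[row + d_row][col + d_col] == 'M')
--         s_count += int(crossword[row + d_row][col + d_col] == 'S')
--
--     if m_count != 2 or s_count != 2:
--         return 0
--
--     return int(crossword[row - 1][col - 1] != crossword[row + 1][col + 1])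
-- ===== SOURCE B (Python) =====
-- def find_xmas_in_crossword(row, col, crossword):
--     if crossword[row][col] != 'A':
--         return 0
--     tl = crossword[row - 1][col - 1]
--     br = crossword[row + 1][col + 1]
--     tr = crossword[row - 1][col + 1]
--     bl = crossword[row + 1][col - 1]
--     diag1 = tl + 'A' + br
--     diag2 = tr + 'A' + bl
--     return int(diag1 in ('MAS', 'SAM') and diag2 in ('MAS', 'SAM'))
-- ===== Notes on version B (the rewrite author's own statement) =====
-- stated objective: idiomatic
-- what changed: Replaces the M/S counting loop over the four corners plus the TL!=BR inequality test with direct construction of the two diagonal strings and membership tests in {'MAS','SAM'}.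
import Mathlib
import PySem

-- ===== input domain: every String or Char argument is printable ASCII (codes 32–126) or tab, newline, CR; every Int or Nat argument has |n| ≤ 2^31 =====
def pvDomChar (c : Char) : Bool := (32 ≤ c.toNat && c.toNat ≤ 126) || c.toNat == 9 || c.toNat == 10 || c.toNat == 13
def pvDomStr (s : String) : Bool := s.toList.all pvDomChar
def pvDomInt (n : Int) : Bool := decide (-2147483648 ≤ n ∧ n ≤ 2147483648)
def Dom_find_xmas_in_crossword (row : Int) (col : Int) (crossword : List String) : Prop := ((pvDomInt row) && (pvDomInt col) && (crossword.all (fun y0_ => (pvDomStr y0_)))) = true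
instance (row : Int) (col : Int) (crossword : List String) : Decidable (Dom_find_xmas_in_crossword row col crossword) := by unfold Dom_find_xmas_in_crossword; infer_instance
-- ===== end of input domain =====

-- B builds the two diagonal strings and tests membership in {'MAS','SAM'} instead of
-- A's M/S counting loop over the four corners plus the TL != BR inequality (objective: idiomatic).


-- shared helper: crossword[r][c] with Python indexing (negative from the end; none = IndexError)
def cwGet (crossword : List String) (r c : Int) : Option Char :=
  match PySem.List.pyGet? crossword r with
  | none => none
  | some s => PySem.Str.pyGet? s c

-- ===== PORT A =====
def find_xmas_in_crossword (row : Int) (col : Int) (crossword : List String) : Int :=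
  match cwGet crossword row col with
  | none => 0  -- Python raises IndexError here; excluded by Pre_
  | some center =>
    if center ≠ 'A' then 0
    else
      -- the counting loop over the four corner offsets
      let st := [((-1 : Int), (-1 : Int)), (-1, 1), (1, -1), (1, 1)].foldl
        (fun (ms : Int × Int) d =>
          -- .getD ' ' : Python raises IndexError on none; excluded by Pre_
          let ch := (cwGet crossword (row + d.1) (col + d.2)).getD ' '
          (ms.1 + (if ch = 'M' then 1 else 0), ms.2 + (if ch = 'S' then 1 else 0)))
        ((0 : Int), (0 : Int))
      if st.1 ≠ 2 ∨ st.2 ≠ 2 then 0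
      else if (cwGet crossword (row - 1) (col - 1)).getD ' ' ≠ (cwGet crossword (row + 1) (col + 1)).getD ' ' then 1 else 0

-- ===== PORT B =====
def find_xmas_in_crossword_alt (row : Int) (col : Int) (crossword : List String) : Int :=
  match cwGet crossword row col with
  | none => 0  -- Python raises IndexError here; excluded by Pre_
  | some center =>
    if center ≠ 'A' then 0
    else
      let tl := (cwGet crossword (row - 1) (col - 1)).getD ' '
      let br := (cwGet crossword (row + 1) (col + 1)).getD ' '
      let tr := (cwGet crossword (row - 1) (col + 1)).getD ' '
      let bl := (cwGet crossword (row + 1) (col - 1)).getD ' '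
      let diag1 := String.ofList [tl, 'A', br]
      let diag2 := String.ofList [tr, 'A', bl]
      if (diag1 = "MAS" ∨ diag1 = "SAM") ∧ (diag2 = "MAS" ∨ diag2 = "SAM") then 1 else 0

-- ===== PRECONDITION & SPEC =====
-- Pre_ excludes exactly the inputs on which the Python raises IndexError: the centre cell must
-- exist, and if it holds 'A' the four diagonal neighbours must exist too.
def Pre_find_xmas_in_crossword (row : Int) (col : Int) (crossword : List String) : Prop :=
  (cwGet crossword row col).isSome = true ∧
  (cwGet crossword row col = some 'A' →
    ((cwGet crossword (row - 1) (col - 1)).isSome = true ∧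
     (cwGet crossword (row - 1) (col + 1)).isSome = true ∧
     (cwGet crossword (row + 1) (col - 1)).isSome = true ∧
     (cwGet crossword (row + 1) (col + 1)).isSome = true))
instance (row : Int) (col : Int) (crossword : List String) : Decidable (Pre_find_xmas_in_crossword row col crossword) := by unfold Pre_find_xmas_in_crossword; infer_instance

def pvWitness_find_xmas_in_crossword : Int × Int × List String := (1, 1, ["M.S", ".A.", "M.S"])

def Spec_find_xmas_in_crossword (row : Int) (col : Int) (crossword : List String) (out : Int) : Prop := out = find_xmas_in_crossword_alt row col crossword
instance (row : Int) (col : Int) (crossword : List String) (out : Int) : Decidable (Spec_find_xmas_in_crossword row col crossword out) := by unfold Spec_find_xmas_in_crossword; infer_instance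

-- ===== CLAIM (what is proved, stated in full; the proofs are below) =====
def Claim_equal_find_xmas_in_crossword : Prop := ∀ (row : Int) (col : Int) (crossword : List String), Dom_find_xmas_in_crossword row col crossword → Pre_find_xmas_in_crossword row col crossword → Spec_find_xmas_in_crossword row col crossword (find_xmas_in_crossword row col crossword)

-- ===== LEMMAS AND PROOFS =====

lemma mas_iff (a b : Char) :
    (String.ofList [a, 'A', b] = "MAS" ∨ String.ofList [a, 'A', b] = "SAM") ↔
      ((a = 'M' ∧ b = 'S') ∨ (a = 'S' ∧ b = 'M')) := by
  rw [show ("MAS" : String) = String.ofList ['M','A','S'] from rfl,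
      show ("SAM" : String) = String.ofList ['S','A','M'] from rfl,
      String.ofList_inj, String.ofList_inj]
  simp

lemma core (tl tr bl br : Char) :
    (if ((0 : Int) + (if tl = 'M' then 1 else 0) + (if tr = 'M' then 1 else 0)
          + (if bl = 'M' then 1 else 0) + (if br = 'M' then 1 else 0) ≠ 2 ∨
        (0 : Int) + (if tl = 'S' then 1 else 0) + (if tr = 'S' then 1 else 0)
          + (if bl = 'S' then 1 else 0) + (if br = 'S' then 1 else 0) ≠ 2)
      then (0 : Int)
      else if tl = br then 0 else 1)
    = (if ((tl = 'M' ∧ br = 'S') ∨ (tl = 'S' ∧ br = 'M')) ∧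
          ((tr = 'M' ∧ bl = 'S') ∨ (tr = 'S' ∧ bl = 'M')) then 1 else 0) := by
  by_cases h1 : tl = 'M' <;> by_cases h2 : tl = 'S' <;>
  by_cases h3 : tr = 'M' <;> by_cases h4 : tr = 'S' <;>
  by_cases h5 : bl = 'M' <;> by_cases h6 : bl = 'S' <;>
  by_cases h7 : br = 'M' <;> by_cases h8 : br = 'S' <;>
  simp_all

-- ===== VERDICT (by name: the statement is the Claim_ definition above) =====
theorem find_xmas_in_crossword_spec : Claim_equal_find_xmas_in_crossword := by
  intro row col crossword _dom hpre
  obtain ⟨h1, h2⟩ := hpre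
  unfold Spec_find_xmas_in_crossword find_xmas_in_crossword find_xmas_in_crossword_alt
  cases hc : cwGet crossword row col with
  | none => simp [hc] at h1
  | some c =>
    by_cases hA : c = 'A'
    · subst hA
      obtain ⟨htl, htr, hbl, hbr⟩ := h2 hc
      obtain ⟨tl, htl⟩ := Option.isSome_iff_exists.mp htl
      obtain ⟨tr, htr⟩ := Option.isSome_iff_exists.mp htr
      obtain ⟨bl, hbl⟩ := Option.isSome_iff_exists.mp hbl
      obtain ⟨br, hbr⟩ := Option.isSome_iff_exists.mp hbr
      simp only [sub_eq_add_neg] at htl htr hbl hbr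
      simp only [List.foldl, htl, htr, hbl, hbr, Option.getD_some, ite_not, reduceIte,
        sub_eq_add_neg, mas_iff]
      exact core tl tr bl br
    · simp [hA]
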